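-- pv_equiv track=rewrite | github.com/debexpo/debexpo | debexpo/accounts/views.py | _format_fingerprint
-- ===== SOURCE A (Python) =====
-- def _format_fingerprint(fingerprint):
--     prettify = ''
--     for index in range(0, len(fingerprint)):
--         prettify += fingerprint[index]
--         if not (index + 1) % 4:
--             prettify += '&nbsp;'
--         if not (index + 1) % 20:
--             prettify += '&nbsp;'
--
--     return prettify
-- ===== SOURCE B (Python) =====
-- def _format_fingerprint(fingerprint):
--     out = []
--     for g in range((len(fingerprint) + 3) // 4):
--         chunk = fingerprint[4 * g:4 * g + 4]
--         out.append(chunk)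
--         if len(chunk) == 4:
--             out.append('&nbsp;')
--             if (g + 1) % 5 == 0:
--                 out.append('&nbsp;')
--     return ''.join(out)
-- ===== Notes on version B (the rewrite author's own statement) =====
-- stated objective: idiomatic
-- what changed: B walks over 4-character blocks (slices fingerprint[4g:4g+4]) appending each block and its separator, then joins the collected pieces once, instead of A's per-character loop with modulus tests and string concatenation at every index.
import Mathlib
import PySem

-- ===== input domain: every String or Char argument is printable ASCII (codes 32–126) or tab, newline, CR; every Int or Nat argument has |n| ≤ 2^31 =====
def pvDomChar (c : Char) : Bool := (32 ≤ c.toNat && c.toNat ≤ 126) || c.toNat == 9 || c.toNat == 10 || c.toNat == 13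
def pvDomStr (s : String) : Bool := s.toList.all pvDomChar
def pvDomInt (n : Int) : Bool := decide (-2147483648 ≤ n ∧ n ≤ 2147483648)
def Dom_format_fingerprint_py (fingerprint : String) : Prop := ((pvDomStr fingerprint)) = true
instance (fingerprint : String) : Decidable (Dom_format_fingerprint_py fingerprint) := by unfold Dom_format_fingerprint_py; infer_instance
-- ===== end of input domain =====

-- B iterates over 4-character slices instead of single characters (objective: a more idiomatic per-block decomposition); same return value.

def nbspChars : List Char := ['&', 'n', 'b', 's', 'p', ';']

-- ===== PORT A =====
-- loop body of A: prettify += fingerprint[index]; '&nbsp;' after every 4th and every 20th character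
def stepA (cs : List Char) (prettify : List Char) (index : Int) : List Char :=
  let prettify := prettify ++ ((PySem.List.pyGet? cs index).elim [] (fun c => [c]))
  let prettify := if PySem.Int.mod (index + 1) 4 == 0 then prettify ++ nbspChars else prettify
  if PySem.Int.mod (index + 1) 20 == 0 then prettify ++ nbspChars else prettify

def format_fingerprint_py (fingerprint : String) : String :=
  let cs := fingerprint.toList
  String.ofList ((PySem.List.pyRange 0 (cs.length : Int) 1).foldl (stepA cs) [])

-- ===== PORT B =====
-- loop body of B: append the block fingerprint[4g:4g+4]; a full block is followed by '&nbsp;' (a second one at each 20-char boundary)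
def stepB (cs : List Char) (out : List (List Char)) (g : Int) : List (List Char) :=
  let chunk := PySem.List.slice cs (some (4 * g)) (some (4 * g + 4))
  let out := out ++ [chunk]
  if chunk.length == 4 then
    let out := out ++ [nbspChars]
    if PySem.Int.mod (g + 1) 5 == 0 then out ++ [nbspChars] else out
  else out

def format_fingerprint_py_alt (fingerprint : String) : String :=
  let cs := fingerprint.toList
  String.ofList (PySem.Chars.join []
    ((PySem.List.pyRange 0 (PySem.Int.floordiv ((cs.length : Int) + 3) 4) 1).foldl (stepB cs) []))

-- ===== PRECONDITION & SPEC =====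
def Spec_format_fingerprint_py (fingerprint : String) (out : String) : Prop := out = format_fingerprint_py_alt fingerprint
instance (fingerprint : String) (out : String) : Decidable (Spec_format_fingerprint_py fingerprint out) := by unfold Spec_format_fingerprint_py; infer_instance

-- ===== CLAIM (what is proved, stated in full; the proofs are below) =====
def Claim_equal_format_fingerprint_py : Prop := ∀ (fingerprint : String), Dom_format_fingerprint_py fingerprint → Spec_format_fingerprint_py fingerprint (format_fingerprint_py fingerprint)

-- ===== LEMMAS AND PROOFS =====

-- common characterisation: remaining characters, current 0-based index n
def gSpec : List Char → Nat → List Char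
  | [], _ => []
  | c :: cs, n =>
      c :: ((if (n + 1) % 4 = 0 then nbspChars else []) ++
            (if (n + 1) % 20 = 0 then nbspChars else []) ++ gSpec cs (n + 1))

-- B-side characterisation: the pieces B appends, from block k on
def gChunks : List Char → Nat → List (List Char)
  | [], _ => []
  | c :: cs, k =>
      [(c :: cs).take 4] ++
      (if 4 ≤ (c :: cs).length then
          [nbspChars] ++ (if (k + 1) % 5 = 0 then [nbspChars] else []) else []) ++
      gChunks ((c :: cs).drop 4) (k + 1)
termination_by cs _ => cs.length
decreasing_by simp

theorem modBeq (n m : Nat) : (PySem.Int.mod ((n : Int)) ((m : Int)) == 0) = decide (n % m = 0) := by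
  have h : PySem.Int.mod ((n : Int)) ((m : Int)) = 0 ↔ n % m = 0 := by
    rw [PySem.Int.mod_eq_zero_iff_dvd, Int.natCast_dvd_natCast, Nat.dvd_iff_mod_eq_zero]
  by_cases hc : n % m = 0
  · simp only [hc, decide_true, beq_iff_eq]
    exact h.mpr hc
  · simp only [hc, decide_false]
    rw [beq_eq_false_iff_ne]
    exact fun e => hc (h.mp e)

theorem stepA_at (done rest : List Char) (c : Char) (acc : List Char) :
    stepA (done ++ c :: rest) acc (done.length : Int)
      = acc ++ c :: ((if (done.length + 1) % 4 = 0 then nbspChars else []) ++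
                     (if (done.length + 1) % 20 = 0 then nbspChars else [])) := by
  unfold stepA
  rw [PySem.List.pyGet?_append_length]
  have c4 := modBeq (done.length + 1) 4
  have c20 := modBeq (done.length + 1) 20
  push_cast at c4 c20
  rw [c4, c20]
  by_cases h4 : (done.length + 1) % 4 = 0 <;> by_cases h20 : (done.length + 1) % 20 = 0 <;>
    simp [h4, h20]

theorem lemA (rest : List Char) : ∀ (done acc : List Char),
    (PySem.List.pyRange (done.length : Int) (((done ++ rest).length : Int)) 1).foldl
      (stepA (done ++ rest)) acc = acc ++ gSpec rest done.length := by
  induction rest with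
  | nil =>
      intro done acc
      simp [PySem.List.pyRange_one_eq_nil, gSpec]
  | cons c cs ih =>
      intro done acc
      have hlt : (done.length : Int) < (((done ++ c :: cs).length : Int)) := by
        simp only [List.length_append, List.length_cons]
        push_cast
        omega
      rw [PySem.List.pyRange_one_cons hlt, List.foldl_cons, stepA_at]
      have hsplit : done ++ c :: cs = (done ++ [c]) ++ cs := by simp
      have ih' := ih (done ++ [c]) (acc ++ c :: ((if (done.length + 1) % 4 = 0 then nbspChars else []) ++
                     (if (done.length + 1) % 20 = 0 then nbspChars else [])))
      rw [← hsplit] at ih'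
      simp only [List.length_append, List.length_cons, List.length_nil, Nat.zero_add] at ih' ⊢
      push_cast at ih' ⊢
      rw [ih']
      simp [gSpec]

theorem stepB_at (done rest : List Char) (k : Nat) (hk : done.length = 4 * k)
    (out : List (List Char)) :
    stepB (done ++ rest) out (k : Int)
      = out ++ [rest.take 4] ++
        (if 4 ≤ rest.length then
            [nbspChars] ++ (if (k + 1) % 5 = 0 then [nbspChars] else []) else []) := by
  unfold stepB
  have h2 : (4 * (k : Int) + 4) = ((done.length : Nat) : Int) + ((4 : Nat) : Int) := by
    omega
  have h1 : (4 * (k : Int)) = ((done.length : Nat) : Int) := by omega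
  rw [h2, h1, PySem.List.slice_natCast_add, List.drop_left]
  have c5 := modBeq (k + 1) 5
  push_cast at c5
  rw [c5]
  by_cases hge : 4 ≤ rest.length
  · by_cases h5 : (k + 1) % 5 = 0 <;> simp [h5, hge]
  · simp [hge]

theorem lemB (N : Nat) : ∀ (rest done : List Char) (k : Nat), done.length = 4 * k →
    rest.length ≤ N → ∀ (out : List (List Char)),
    (PySem.List.pyRange (k : Int) ((((done ++ rest).length + 3) / 4 : Nat) : Int) 1).foldl
      (stepB (done ++ rest)) out = out ++ gChunks rest k := by
  induction N with
  | zero =>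
      intro rest done k hk hle out
      have : rest = [] := List.length_eq_zero_iff.mp (by omega)
      subst this
      have hG : ((done ++ ([] : List Char)).length + 3) / 4 = k := by
        simp only [List.append_nil, hk]; omega
      rw [hG, PySem.List.pyRange_one_eq_nil (le_refl _)]
      simp [gChunks]
  | succ N ih =>
      intro rest done k hk hle out
      match rest with
      | [] =>
          have hG : ((done ++ ([] : List Char)).length + 3) / 4 = k := by
            simp only [List.append_nil, hk]; omega
          rw [hG, PySem.List.pyRange_one_eq_nil (le_refl _)]
          simp [gChunks]
      | c :: cs =>
          have hle' : cs.length + 1 ≤ N + 1 := by simpa using hle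
          have htot : (done ++ c :: cs).length = 4 * k + (cs.length + 1) := by
            simp [hk]
          have hlt : (k : Int) < ((((done ++ c :: cs).length + 3) / 4 : Nat) : Int) := by
            have hx : k < ((done ++ c :: cs).length + 3) / 4 := by rw [htot]; omega
            exact_mod_cast hx
          rw [PySem.List.pyRange_one_cons hlt, List.foldl_cons, stepB_at done (c :: cs) k hk]
          by_cases hge : 4 ≤ (c :: cs).length
          · -- full block: recurse on the remaining characters
            have hge' : 4 ≤ cs.length + 1 := by simpa using hge
            have hmin : (done ++ (c :: cs).take 4).length = 4 * (k + 1) := by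
              simp only [List.length_append, List.length_take, List.length_cons, hk]
              omega
            have happ : (done ++ (c :: cs).take 4) ++ (c :: cs).drop 4 = done ++ c :: cs := by
              rw [List.append_assoc, List.take_append_drop]
            have ih' := ih ((c :: cs).drop 4) (done ++ (c :: cs).take 4) (k + 1) hmin
              (by simp only [List.length_drop, List.length_cons]; omega)
              (out ++ [(c :: cs).take 4] ++
                ([nbspChars] ++ (if (k + 1) % 5 = 0 then [nbspChars] else [])))
            rw [happ] at ih'
            have hcast : ((k + 1 : Nat) : Int) = (k : Int) + 1 := by push_cast; ring
            rw [hcast] at ih'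
            rw [if_pos hge, ih']
            conv_rhs => rw [gChunks]
            rw [if_pos hge]
            simp
          · -- final partial block: the range is exhausted after this step
            have hge' : ¬ 4 ≤ cs.length + 1 := by simpa using hge
            have hG1 : ((done ++ c :: cs).length + 3) / 4 = k + 1 := by
              rw [htot]; omega
            rw [if_neg hge, hG1]
            have hnil : PySem.List.pyRange ((k : Int) + 1) (((k + 1 : Nat) : Int)) 1 = [] := by
              apply PySem.List.pyRange_one_eq_nil
              push_cast
              omega
            rw [hnil]
            conv_rhs => rw [gChunks]
            rw [if_neg hge]
            have hdrop : (c :: cs).drop 4 = [] := by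
              apply List.drop_eq_nil_of_le
              simp only [List.length_cons]
              omega
            rw [hdrop]
            simp [gChunks]

theorem join_nil_flatten (l : List (List Char)) : PySem.Chars.join [] l = l.flatten := by
  induction l with
  | nil => simp [PySem.Chars.join, List.intercalate]
  | cons a l ih =>
      cases l with
      | nil => simp [PySem.Chars.join, List.intercalate]
      | cons b l' =>
          rw [PySem.Chars.join_cons_cons]
          simp [ih]

theorem gSpec_no_sep (rest : List Char) : ∀ (n : Nat),
    (∀ i < rest.length, (n + i + 1) % 4 ≠ 0 ∧ (n + i + 1) % 20 ≠ 0) →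
    gSpec rest n = rest := by
  induction rest with
  | nil => intro n _; rfl
  | cons c cs ih =>
      intro n h
      have h0 := h 0 (by simp)
      simp only [Nat.add_zero] at h0
      rw [gSpec, if_neg h0.1, if_neg h0.2]
      simp only [List.nil_append, List.cons.injEq, true_and]
      exact ih (n + 1) (fun i hi => by
        have h' := h (i + 1) (by simp only [List.length_cons]; omega)
        have e : n + (i + 1) + 1 = n + 1 + i + 1 := by omega
        rw [e] at h'
        exact h')

theorem gSpec_eq_flatten (N : Nat) : ∀ (rest : List Char) (k : Nat), rest.length ≤ N →
    gSpec rest (4 * k) = (gChunks rest k).flatten := by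
  induction N with
  | zero =>
      intro rest k hle
      have : rest = [] := List.length_eq_zero_iff.mp (by omega)
      subst this
      simp [gSpec, gChunks]
  | succ N ih =>
      intro rest k hle
      by_cases hge : 4 ≤ rest.length
      · rcases rest with _ | ⟨a, rest1⟩
        · simp at hge
        rcases rest1 with _ | ⟨b, rest2⟩
        · simp at hge
        rcases rest2 with _ | ⟨c, rest3⟩
        · simp at hge
        rcases rest3 with _ | ⟨d, rest'⟩
        · simp at hge
        have h1 : ¬ (4 * k + 1) % 4 = 0 := by omega
        have h2 : ¬ (4 * k + 1 + 1) % 4 = 0 := by omega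
        have h3 : ¬ (4 * k + 1 + 1 + 1) % 4 = 0 := by omega
        have h4 : (4 * k + 1 + 1 + 1 + 1) % 4 = 0 := by omega
        have h1' : ¬ (4 * k + 1) % 20 = 0 := by omega
        have h2' : ¬ (4 * k + 1 + 1) % 20 = 0 := by omega
        have h3' : ¬ (4 * k + 1 + 1 + 1) % 20 = 0 := by omega
        have ihr := ih rest' (k + 1) (by
          simp only [List.length_cons] at hle
          omega)
        have h44 : 4 * k + 1 + 1 + 1 + 1 = 4 * (k + 1) := by omega
        rw [gSpec, gSpec, gSpec, gSpec, if_neg h1, if_neg h1', if_neg h2, if_neg h2',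
          if_neg h3, if_neg h3', if_pos h4, h44, ihr]
        conv_rhs => rw [gChunks]
        rw [if_pos (by simp only [List.length_cons]; omega : 4 ≤ (a :: b :: c :: d :: rest').length)]
        by_cases h5 : (k + 1) % 5 = 0
        · rw [if_pos (by omega : (4 * (k + 1)) % 20 = 0), if_pos h5]
          simp
        · rw [if_neg (by omega : ¬ (4 * (k + 1)) % 20 = 0), if_neg h5]
          simp
      · -- short remainder: no separators at all
        have hns : gSpec rest (4 * k) = rest := by
          apply gSpec_no_sep
          intro i hi
          constructor <;> omega
        cases rest with
        | nil => simp [gSpec, gChunks]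
        | cons c cs =>
            rw [hns]
            conv_rhs => rw [gChunks]
            rw [if_neg hge]
            have hdrop : (c :: cs).drop 4 = [] := by
              apply List.drop_eq_nil_of_le
              simp only [List.length_cons] at hge ⊢
              omega
            have htake : (c :: cs).take 4 = c :: cs := by
              apply List.take_of_length_le
              simp only [List.length_cons] at hge ⊢
              omega
            rw [hdrop, htake]
            simp [gChunks]

-- ===== VERDICT (by name: the statement is the Claim_ definition above) =====
theorem format_fingerprint_py_spec : Claim_equal_format_fingerprint_py := by
  intro s _
  unfold Spec_format_fingerprint_py format_fingerprint_py format_fingerprint_py_alt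
  have hA := lemA s.toList [] []
  simp only [List.nil_append, List.length_nil, Nat.cast_zero] at hA
  have hfd : PySem.Int.floordiv ((s.toList.length : Int) + 3) 4
      = (((s.toList.length + 3) / 4 : Nat) : Int) := by
    rw [PySem.Int.floordiv_eq_iff_of_pos (by omega)]
    have hx1 : 4 * ((s.toList.length + 3) / 4) ≤ s.toList.length + 3 := by omega
    have hx2 : s.toList.length + 3 < 4 * ((s.toList.length + 3) / 4) + 4 := by omega
    constructor
    · push_cast
      omega
    · push_cast
      omega
  have hB := lemB s.toList.length s.toList [] 0 (by simp) (le_refl _) []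
  simp only [List.nil_append, Nat.cast_zero] at hB
  simp only [hA, hfd]
  rw [hB, join_nil_flatten]
  rw [← gSpec_eq_flatten s.toList.length s.toList 0 (le_refl _)]
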